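-- pv_equiv track=rewrite | github.com/AB-code-crypto/ibr | inout/build_hour_patterns.py | _get_base_instrument
-- ===== SOURCE A (Python) =====
-- _FUTURES_MONTH_CODES = set("FGHJKMNQUVXZ")
--
-- def _get_base_instrument(contract: str) -> str:
--     """
--     Выделить базовый тикер (root) из имени фьючерсного контракта.
--
--     Идея:
--         <ROOT><MONTH_CODE><YEAR_DIGIT>
--
--     Примеры:
--         'MNQM5'  -> 'MNQ'
--         'MNQU5'  -> 'MNQ'
--         'MNQZ5'  -> 'MNQ'
--         'ESM5'   -> 'ES'
--         'SVIX'   -> 'SVIX'  (если нет месячного суффикса).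
--
--     Алгоритм:
--         - ищем первую букву из набора MONTH_CODES, после которой сразу идёт цифра;
--         - всё, что слева от неё, считаем базовым тикером;
--         - если ничего не нашли (не фьючерсный формат) — падаем в резервный вариант:
--           берём все начальные буквы до первой цифры.
--     """
--     n = len(contract)
--
--     # Попытка №1: распознать шаблон <ROOT><MONTH><DIGIT>
--     for i, ch in enumerate(contract):
--         if ch in _FUTURES_MONTH_CODES and i + 1 < n and contract[i + 1].isdigit():
--             root = contract[:i]
--             if root:
--                 return root
--             # если по какой-то причине слева ничего нет — выходим в fallback
--             break
--
--     # Попытка №2 (fallback): просто берём начальный буквенный префикс до первой цифры.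
--     prefix_chars = []
--     for ch in contract:
--         if ch.isalpha():
--             prefix_chars.append(ch)
--         else:
--             break
--
--     root = "".join(prefix_chars)
--     return root or contract
-- ===== SOURCE B (Python) =====
-- _FUTURES_MONTH_CODES = set("FGHJKMNQUVXZ")
--
-- def _get_base_instrument(contract: str) -> str:
--     # index of the first month-code letter immediately followed by a digit
--     # (0 both when there is no such pair and when the pair starts the string,
--     #  which are exactly the cases that fall through to the fallback)
--     i = next((k for k, (a, b) in enumerate(zip(contract, contract[1:]))
--               if a in _FUTURES_MONTH_CODES and b.isdigit()), 0)
--     if i: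
--         return contract[:i]
--     j = next((k for k, c in enumerate(contract) if not c.isalpha()), len(contract))
--     return contract[:j] or contract
-- ===== Notes on version B (the rewrite author's own statement) =====
-- stated objective: idiomatic
-- what changed: A's two imperative break-loops (indexed scan with early return/break, then a prefix-accumulator loop) are replaced by declarative first-match-index computations: next() over enumerate(zip(s, s[1:])) for the month-code+digit pair and next() over enumerate(s) for the first non-letter, followed by slicing.
import Mathlib
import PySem

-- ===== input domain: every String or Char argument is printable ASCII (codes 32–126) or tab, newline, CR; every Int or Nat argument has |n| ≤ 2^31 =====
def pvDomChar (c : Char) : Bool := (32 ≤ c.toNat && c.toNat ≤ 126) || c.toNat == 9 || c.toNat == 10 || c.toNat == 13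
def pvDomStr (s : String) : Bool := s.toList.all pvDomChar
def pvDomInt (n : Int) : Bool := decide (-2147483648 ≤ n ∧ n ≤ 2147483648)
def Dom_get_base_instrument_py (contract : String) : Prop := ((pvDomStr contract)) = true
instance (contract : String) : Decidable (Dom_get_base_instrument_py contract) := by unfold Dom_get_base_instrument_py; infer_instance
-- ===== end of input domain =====

-- B replaces A's two explicit break-loops by declarative first-match-index computations
-- (next over enumerate(zip(s, s[1:])) and over enumerate(s)) plus slices; objective: idiomatic, same cost.

-- ===== PORT A =====
def pvMonthCodes : List Char := "FGHJKMNQUVXZ".toList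

-- the first for-loop of A: early `return root` = some root; `break` or loop end = none
def pvATry1 (full : List Char) (n : Nat) : List Char → Nat → Option (List Char)
  | [], _ => none
  | ch :: rest, i =>
    if pvMonthCodes.contains ch && decide (i + 1 < n) && PySem.Chars.isdigit (full.getD (i + 1) ' ') then
      (if full.take i ≠ [] then some (full.take i) else none)
    else pvATry1 full n rest (i + 1)

-- the fallback for-loop of A: collect leading alphabetic chars, break at the first non-letter
def pvAPrefix : List Char → List Char
  | [] => []
  | ch :: rest => if PySem.Chars.isalpha ch then ch :: pvAPrefix rest else []

def get_base_instrument_py (contract : String) : String :=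
  let s := contract.toList
  let n := s.length
  match pvATry1 s n s 0 with
  | some root => String.ofList root
  | none =>
    let root := pvAPrefix s
    if root = [] then contract else String.ofList root

-- ===== PORT B =====
-- the condition of B's first generator expression: month-code letter immediately followed by a digit
def pvPairCond (p : Char × Char) : Bool := pvMonthCodes.contains p.1 && PySem.Chars.isdigit p.2

def get_base_instrument_py_alt (contract : String) : String :=
  let s := contract.toList
  let i := ((s.zip (s.drop 1)).findIdx? pvPairCond).getD 0
  if i ≠ 0 then String.ofList (s.take i)
  else
    let j := (s.findIdx? (fun c => !PySem.Chars.isalpha c)).getD s.length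
    let r := s.take j
    if r = [] then contract else String.ofList r

-- ===== PRECONDITION & SPEC =====
def Spec_get_base_instrument_py (contract : String) (out : String) : Prop := out = get_base_instrument_py_alt contract
instance (contract : String) (out : String) : Decidable (Spec_get_base_instrument_py contract out) := by unfold Spec_get_base_instrument_py; infer_instance

-- ===== CLAIM (what is proved, stated in full; the proofs are below) =====
def Claim_equal_get_base_instrument_py : Prop := ∀ (contract : String), Dom_get_base_instrument_py contract → Spec_get_base_instrument_py contract (get_base_instrument_py contract)

-- ===== LEMMAS AND PROOFS =====

theorem pvATry1_cons (full : List Char) (n : Nat) (ch : Char) (rest : List Char) (i : Nat) :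
    pvATry1 full n (ch :: rest) i =
      if pvMonthCodes.contains ch && decide (i + 1 < n) && PySem.Chars.isdigit (full.getD (i + 1) ' ') then
        (if full.take i ≠ [] then some (full.take i) else none)
      else pvATry1 full n rest (i + 1) := rfl

-- A's fallback loop computes the take-up-to-first-non-letter slice that B takes directly
theorem pvAPrefix_eq (s : List Char) :
    pvAPrefix s = s.take ((s.findIdx? (fun c => !PySem.Chars.isalpha c)).getD s.length) := by
  induction s with
  | nil => rfl
  | cons c rest ih =>
    by_cases h : PySem.Chars.isalpha c = true
    · rw [show pvAPrefix (c :: rest) = c :: pvAPrefix rest from by simp [pvAPrefix, h], ih]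
      cases hfi : rest.findIdx? (fun c => !PySem.Chars.isalpha c) with
      | none => simp [List.findIdx?_cons, h, hfi]
      | some k => simp [List.findIdx?_cons, h, hfi]
    · have h' : PySem.Chars.isalpha c = false := by simpa using h
      simp [pvAPrefix, List.findIdx?_cons, h']

theorem pvGetD_mid (pre : List Char) (x y : Char) (t : List Char) (d : Char) :
    (pre ++ x :: y :: t).getD (pre.length + 1) d = y := by
  induction pre with
  | nil => rfl
  | cons a pre ih =>
    simpa only [List.cons_append, List.length_cons, Nat.succ_add, List.getD_cons_succ] using ih

-- A's first loop, started after the prefix `pre`, equals B's first-match-index computation on the suffix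
theorem pvATry1_eq (suf : List Char) : ∀ (pre : List Char),
    pvATry1 (pre ++ suf) (pre ++ suf).length suf pre.length =
      match (suf.zip (suf.drop 1)).findIdx? pvPairCond with
      | some k => if pre.length + k = 0 then none else some ((pre ++ suf).take (pre.length + k))
      | none => none := by
  induction suf with
  | nil => intro pre; simp [pvATry1]
  | cons ch rest ih =>
    intro pre
    cases rest with
    | nil =>
      rw [pvATry1_cons]
      simp [pvATry1, List.length_append]
    | cons b rest' =>
      have hget : (pre ++ ch :: b :: rest').getD (pre.length + 1) ' ' = b := pvGetD_mid pre ch b rest' ' '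
      have hlt : decide (pre.length + 1 < (pre ++ ch :: b :: rest').length) = true := by
        simp [List.length_append]
      have hzip : (ch :: b :: rest').zip ((ch :: b :: rest').drop 1)
          = (ch, b) :: ((b :: rest').zip ((b :: rest').drop 1)) := by
        simp [List.zip_cons_cons]
      rw [pvATry1_cons, hget, hlt, hzip, List.findIdx?_cons]
      by_cases hc : pvPairCond (ch, b) = true
      · have hc' : (pvMonthCodes.contains ch && true && PySem.Chars.isdigit b) = true := by
          simpa [pvPairCond] using hc
        rw [hc', if_pos rfl, hc, if_pos rfl]
        have htake : (pre ++ ch :: b :: rest').take pre.length = pre := List.take_left' rfl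
        rw [htake]
        cases pre with
        | nil => simp
        | cons a t => simp
      · have hc'' : pvPairCond (ch, b) = false := by simpa using hc
        have hcf : (pvMonthCodes.contains ch && true && PySem.Chars.isdigit b) = false := by
          simpa [pvPairCond] using hc''
        rw [hcf, if_neg (by decide), hc'', if_neg (show ¬ (false = true) by decide)]
        have ih' := ih (pre ++ [ch])
        have e1 : (pre ++ [ch]) ++ b :: rest' = pre ++ ch :: b :: rest' := by simp
        have e2 : (pre ++ [ch]).length = pre.length + 1 := by simp
        rw [e1, e2] at ih'
        rw [ih']
        cases hfi : ((b :: rest').zip ((b :: rest').drop 1)).findIdx? pvPairCond with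
        | none => simp
        | some k =>
          have : pre.length + 1 + k = pre.length + (k + 1) := by omega
          simp [this]

theorem pv_main (contract : String) :
    get_base_instrument_py contract = get_base_instrument_py_alt contract := by
  simp only [get_base_instrument_py, get_base_instrument_py_alt]
  have h := pvATry1_eq contract.toList []
  simp only [List.nil_append, List.length_nil, Nat.zero_add] at h
  rw [h, pvAPrefix_eq]
  cases hfi : (contract.toList.zip (contract.toList.drop 1)).findIdx? pvPairCond with
  | none => simp
  | some k =>
    cases k with
    | zero => simp
    | succ k' => simp

-- ===== VERDICT (by name: the statement is the Claim_ definition above) =====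
theorem get_base_instrument_py_spec : Claim_equal_get_base_instrument_py := by
  intro contract _
  unfold Spec_get_base_instrument_py
  exact pv_main contract
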